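-- pv_equiv track=rewrite | github.com/vjsingh1984/victor | victor/agent/coordinators/prompt_builder_coordinator.py | build_thinking_disabled_prompt
-- ===== SOURCE A (Python) =====
-- def build_thinking_disabled_prompt(base_prompt: str) -> str:
--     """Build prompt for thinking-disabled mode.
--
--     Removes thinking-related instructions when thinking mode is disabled
--     (e.g., for models that don't support extended thinking).
--
--     Args:
--         base_prompt: Base prompt with thinking instructions
--
--     Returns:
--         Prompt without thinking instructions
--     """
--     # Remove thinking-related sections
--     thinking_keywords = [
--         "thinking process",
--         "step-by-step reasoning",
--         "thought process",
--         "reasoning steps",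
--     ]
--
--     lines = base_prompt.split("\n")
--     filtered_lines = []
--     skip = False
--
--     for line in lines:
--         line_lower = line.lower()
--         # Check if line starts thinking section
--         if any(keyword in line_lower for keyword in thinking_keywords):
--             skip = True
--             continue
--
--         # Check if line ends thinking section
--         if skip and line.strip() and not any(keyword in line_lower for keyword in thinking_keywords):
--             skip = False
--
--         if not skip:
--             filtered_lines.append(line)
--
--     return "\n".join(filtered_lines)
-- ===== SOURCE B (Python) =====
-- def build_thinking_disabled_prompt(base_prompt: str) -> str:
--     """Build prompt for thinking-disabled mode (index-based rewrite)."""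
--     keywords = (
--         "thinking process",
--         "step-by-step reasoning",
--         "thought process",
--         "reasoning steps",
--     )
--
--     def has_kw(line):
--         low = line.lower()
--         return any(k in low for k in keywords)
--
--     lines = base_prompt.split("\n")
--     out = []
--     n = len(lines)
--     i = 0
--     while i < n:
--         line = lines[i]
--         if has_kw(line):
--             # drop the keyword line and consume the blank/keyword run after it
--             i += 1
--             while i < n and (not lines[i].strip() or has_kw(lines[i])):
--                 i += 1
--         else:
--             out.append(line)
--             i += 1
--     return "\n".join(out)
-- ===== Notes on version B (the rewrite author's own statement) =====
-- stated objective: alternative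
-- what changed: Replaces A's boolean skip-flag state machine (flag set by keyword lines, reset by the next non-blank non-keyword line) with an index-based while loop that, upon a keyword line, runs an inner while loop consuming the whole following run of blank or keyword lines; ordinary lines are appended directly.
import Mathlib
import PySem

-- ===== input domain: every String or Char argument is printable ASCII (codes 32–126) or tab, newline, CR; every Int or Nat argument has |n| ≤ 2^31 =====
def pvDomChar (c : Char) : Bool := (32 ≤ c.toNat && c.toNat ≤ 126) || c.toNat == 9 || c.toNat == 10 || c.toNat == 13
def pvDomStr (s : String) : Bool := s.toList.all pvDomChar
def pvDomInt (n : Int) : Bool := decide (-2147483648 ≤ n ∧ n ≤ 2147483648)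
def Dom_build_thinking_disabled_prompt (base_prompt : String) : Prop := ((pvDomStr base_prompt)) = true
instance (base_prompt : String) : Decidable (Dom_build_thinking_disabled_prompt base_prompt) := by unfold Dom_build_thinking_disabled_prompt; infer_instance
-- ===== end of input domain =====

-- B replaces A's boolean `skip` state machine by an index-style loop that, after a keyword
-- line, consumes the whole blank/keyword run in an inner loop (objective: alternative decomposition).

-- ===== PORT A =====
def pvKeywords : List (List Char) :=
  ["thinking process".toList, "step-by-step reasoning".toList,
   "thought process".toList, "reasoning steps".toList]

-- any(keyword in line_lower for keyword in thinking_keywords)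
def pvKwAnyLower (line_lower : List Char) : Bool :=
  pvKeywords.any (fun k => PySem.Chars.isIn k line_lower)

-- the `for line in lines` loop of A, state = (filtered_lines = acc, skip)
def pvALoop : List (List Char) → Bool → List (List Char) → List (List Char)
  | [], _, acc => acc
  | line :: rest, skip, acc =>
    let line_lower := PySem.Chars.lower line
    if pvKwAnyLower line_lower then
      pvALoop rest true acc
    else
      let skip2 := if skip && !(PySem.Chars.strip line).isEmpty && !(pvKwAnyLower line_lower)
                   then false else skip
      if !skip2 then pvALoop rest skip2 (acc ++ [line]) else pvALoop rest skip2 acc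

def build_thinking_disabled_prompt (base_prompt : String) : String :=
  let lines := PySem.Chars.splitOn base_prompt.toList ['\n']
  String.mk (PySem.Chars.join ['\n'] (pvALoop lines false []))

-- ===== PORT B =====
-- has_kw(line) of Source B
def pvHasKw (line : List Char) : Bool :=
  pvKeywords.any (fun k => PySem.Chars.isIn k (PySem.Chars.lower line))

-- the inner `while` loop of Source B: consume blank / keyword lines
def pvConsume : List (List Char) → List (List Char)
  | [] => []
  | l :: rest => if !(PySem.Chars.strip l).isEmpty && !(pvHasKw l) then l :: rest
                 else pvConsume rest

theorem pvConsume_length_le : ∀ ls : List (List Char), (pvConsume ls).length ≤ ls.length := by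
  intro ls
  induction ls with
  | nil => simp [pvConsume]
  | cons l rest ih => simp only [pvConsume]; split <;> simp <;> omega

-- the outer `while i < n` loop of Source B
def pvBLoop : List (List Char) → List (List Char)
  | [] => []
  | line :: rest =>
    if pvHasKw line then pvBLoop (pvConsume rest)
    else line :: pvBLoop rest
termination_by ls => ls.length
decreasing_by
  · exact Nat.lt_succ_of_le (pvConsume_length_le rest)
  · simp

def build_thinking_disabled_prompt_alt (base_prompt : String) : String :=
  let lines := PySem.Chars.splitOn base_prompt.toList ['\n']
  String.mk (PySem.Chars.join ['\n'] (pvBLoop lines))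

-- ===== PRECONDITION & SPEC =====
def Spec_build_thinking_disabled_prompt (base_prompt : String) (out : String) : Prop := out = build_thinking_disabled_prompt_alt base_prompt
instance (base_prompt : String) (out : String) : Decidable (Spec_build_thinking_disabled_prompt base_prompt out) := by unfold Spec_build_thinking_disabled_prompt; infer_instance

-- ===== CLAIM (what is proved, stated in full; the proofs are below) =====
def Claim_equal_build_thinking_disabled_prompt : Prop := ∀ (base_prompt : String), Dom_build_thinking_disabled_prompt base_prompt → Spec_build_thinking_disabled_prompt base_prompt (build_thinking_disabled_prompt base_prompt)

-- ===== LEMMAS AND PROOFS =====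

theorem pvLoop_agree : ∀ ls : List (List Char),
    (∀ acc, pvALoop ls false acc = acc ++ pvBLoop ls) ∧
    (∀ acc, pvALoop ls true acc = acc ++ pvBLoop (pvConsume ls)) := by
  intro ls
  induction ls with
  | nil => simp [pvALoop, pvBLoop, pvConsume]
  | cons l rest ih =>
    obtain ⟨ihF, ihT⟩ := ih
    have hkw : pvKwAnyLower (PySem.Chars.lower l) = pvHasKw l := rfl
    constructor
    · intro acc
      by_cases h : pvHasKw l = true
      · rw [pvALoop, pvBLoop]
        simp only [hkw, h, if_pos]
        exact ihT acc
      · rw [pvALoop, pvBLoop]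
        simp only [hkw, h, if_neg, Bool.false_and, Bool.false_eq_true, if_false,
          Bool.not_false, if_true]
        simp only [Bool.not_eq_true] at h
        simp [h, ihF (acc ++ [l])]
    · intro acc
      by_cases h : pvHasKw l = true
      · rw [pvALoop]
        simp only [hkw, h, if_pos]
        have : pvConsume (l :: rest) = pvConsume rest := by
          simp [pvConsume, h]
        rw [this]; exact ihT acc
      · simp only [Bool.not_eq_true] at h
        by_cases hb : (PySem.Chars.strip l).isEmpty = true
        · rw [pvALoop]
          simp only [hkw, h, Bool.false_eq_true, if_false, hb, Bool.true_and,
            Bool.not_true, Bool.false_and, if_false]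
          have : pvConsume (l :: rest) = pvConsume rest := by
            simp [pvConsume, hb]
          rw [this]; exact ihT acc
        · simp only [Bool.not_eq_true] at hb
          rw [pvALoop]
          simp only [hkw, h, Bool.false_eq_true, if_false, hb, Bool.not_false,
            Bool.true_and, Bool.and_true, if_true, Bool.not_false]
          have hc : pvConsume (l :: rest) = l :: rest := by
            simp [pvConsume, hb, h]
          rw [hc, pvBLoop]
          simp [h, ihF (acc ++ [l])]

-- ===== VERDICT (by name: the statement is the Claim_ definition above) =====
theorem build_thinking_disabled_prompt_spec : Claim_equal_build_thinking_disabled_prompt := by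
  intro base_prompt _
  unfold Spec_build_thinking_disabled_prompt build_thinking_disabled_prompt build_thinking_disabled_prompt_alt
  simp only []
  rw [(pvLoop_agree _).1 []]
  rfl
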